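-- pv_equiv track=rewrite | github.com/JackLong886/automatic-waffle | DOM_Sub/cloud_detec.py | gen_extents
-- ===== SOURCE A (Python) =====
-- def gen_extents(width, height, tile_width, tile_height, x_stride=0, y_stride=0, is_vaild=False):
--     if x_stride > tile_width:
--         raise Exception(f'x_stride({x_stride}) > tile_width({tile_width})')
--     if x_stride > tile_width:
--         raise Exception(f'y_stride({y_stride}) > tile_height({tile_height})')
--     if tile_width > width:
--         raise Exception(f'tile_width({tile_width}) > width({width})')
--     if tile_height > height:
--         raise Exception(f'tile_height({tile_height}) > height({height})')
--
--     if x_stride == 0: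
--         x_stride = tile_width
--     if y_stride == 0:
--         y_stride = tile_height
--
--     extents = []
--     y = 0
--     x = 0
--     y_begin = 0
--     x_begin = 0
--     x_vaild = 0
--     y_vaild = 0
--     x_end = False
--     y_end = False
--     while y < height:
--         if y + tile_height >= height:
--             if is_vaild:
--                 y_begin = y
--                 y_vaild = height - y
--             else:
--                 y_begin = height - tile_height
--                 y_vaild = tile_height
--             y_end = True
--         else:
--             y_begin = y
--             y_vaild = tile_height
--             y_end = False
--         while x < width:
--             if x + tile_width >= width:
--                 if is_vaild:
--                     x_begin = x
--                     x_vaild = width - x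
--                 else:
--                     x_begin = width - tile_width
--                     x_vaild = tile_width
--                 x_end = True
--             else:
--                 x_begin = x
--                 x_vaild = tile_width
--                 x_end = False
--             extents.append((x_begin, y_begin, x_vaild, y_vaild))
--             x += x_stride
--             if x_end: break
--         y += y_stride
--         x = 0
--         if y_end: break
--     return extents
-- ===== SOURCE B (Python) =====
-- def gen_extents(width, height, tile_width, tile_height, x_stride=0, y_stride=0, is_vaild=False):
--     if x_stride > tile_width:
--         raise Exception(f'x_stride({x_stride}) > tile_width({tile_width})')
--     if tile_width > width:
--         raise Exception(f'tile_width({tile_width}) > width({width})')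
--     if tile_height > height:
--         raise Exception(f'tile_height({tile_height}) > height({height})')
--     return [(xb, yb, xv, yv)
--             for (yb, yv) in _axis_tiles(height, tile_height, y_stride, is_vaild)
--             for (xb, xv) in _axis_tiles(width, tile_width, x_stride, is_vaild)]
--
--
-- def _axis_tiles(length, tile, stride, is_vaild):
--     """Closed-form 1D tiling: the number m of interior tiles is computed by one
--     ceiling division instead of stepping a cursor; interior begins are k*stride,
--     and at most one clamped edge tile follows."""
--     if stride == 0:
--         stride = tile
--     bound = min(length, length - tile)       # interior tiles need k*stride < bound
--     m = 0 if bound <= 0 else -((-bound) // stride)   # = ceil(bound / stride)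
--     tiles = [(k * stride, tile) for k in range(m)]
--     if m * stride < length:                  # exactly when an edge tile is emitted
--         tiles.append((m * stride, length - m * stride) if is_vaild else (length - tile, tile))
--     return tiles
-- ===== Notes on version B (the rewrite author's own statement) =====
-- stated objective: alternative
-- what changed: Replaces A's cursor-stepping nested while-loops (eight mutable state variables, break flags) by closed-form arithmetic: per axis one ceiling division yields the interior tile count m, tile origins are generated as k*stride over range(m) plus one arithmetically clamped edge tile, and the two axis lists are combined by a cartesian product.
import Mathlib
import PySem

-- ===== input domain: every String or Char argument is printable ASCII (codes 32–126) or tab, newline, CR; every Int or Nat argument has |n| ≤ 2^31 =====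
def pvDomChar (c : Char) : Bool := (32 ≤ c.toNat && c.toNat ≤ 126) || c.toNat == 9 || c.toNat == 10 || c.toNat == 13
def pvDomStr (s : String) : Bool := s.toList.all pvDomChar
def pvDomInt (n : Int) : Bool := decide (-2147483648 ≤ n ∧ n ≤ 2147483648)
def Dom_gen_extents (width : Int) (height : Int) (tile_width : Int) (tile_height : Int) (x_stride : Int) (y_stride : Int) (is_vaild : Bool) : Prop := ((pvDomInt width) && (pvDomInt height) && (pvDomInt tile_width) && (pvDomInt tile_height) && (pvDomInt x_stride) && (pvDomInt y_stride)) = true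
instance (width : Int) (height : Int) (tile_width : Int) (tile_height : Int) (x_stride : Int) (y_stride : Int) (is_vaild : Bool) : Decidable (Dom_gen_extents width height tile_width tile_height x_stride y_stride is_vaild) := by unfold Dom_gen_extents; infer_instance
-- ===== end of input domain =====

-- B replaces A's cursor-stepping nested while-loops by closed-form arithmetic: one ceiling
-- division per axis gives the interior tile count, origins are k*stride over a range, plus one
-- clamped edge tile; the axes are combined by a cartesian product (objective: alternative).
-- A's while-loops are ported with fuel (length.toNat+1), sufficient on every input Pre_ admits.

-- ===== PORT A =====
-- inner 'while x < width' loop of A, with the row's (y_begin, y_vaild) fixed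
def pvInnerA (width tile_width x_stride : Int) (is_vaild : Bool) (y_begin y_vaild : Int) : Nat → Int → List (Int × Int × Int × Int)
  | 0, _ => []
  | fuel + 1, x =>
    if x < width then
      if x + tile_width ≥ width then
        if is_vaild then [(x, y_begin, width - x, y_vaild)]
        else [(width - tile_width, y_begin, tile_width, y_vaild)]
      else
        (x, y_begin, tile_width, y_vaild) :: pvInnerA width tile_width x_stride is_vaild y_begin y_vaild fuel (x + x_stride)
    else []

-- outer 'while y < height' loop of A (x restarts at 0 each row)
def pvOuterA (width height tile_width tile_height x_stride y_stride : Int) (is_vaild : Bool) : Nat → Int → List (Int × Int × Int × Int)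
  | 0, _ => []
  | fuel + 1, y =>
    if y < height then
      if y + tile_height ≥ height then
        if is_vaild then pvInnerA width tile_width x_stride is_vaild y (height - y) (width.toNat + 1) 0
        else pvInnerA width tile_width x_stride is_vaild (height - tile_height) tile_height (width.toNat + 1) 0
      else
        pvInnerA width tile_width x_stride is_vaild y tile_height (width.toNat + 1) 0
          ++ pvOuterA width height tile_width tile_height x_stride y_stride is_vaild fuel (y + y_stride)
    else []

def gen_extents (width : Int) (height : Int) (tile_width : Int) (tile_height : Int) (x_stride : Int) (y_stride : Int) (is_vaild : Bool) : List (Int × Int × Int × Int) :=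
  if x_stride > tile_width then []          -- A raises here; excluded by Pre_
  else if x_stride > tile_width then []     -- A's duplicated guard (checks x_stride again)
  else if tile_width > width then []        -- A raises here; excluded by Pre_
  else if tile_height > height then []      -- A raises here; excluded by Pre_
  else
    let x_stride := if x_stride = 0 then tile_width else x_stride
    let y_stride := if y_stride = 0 then tile_height else y_stride
    pvOuterA width height tile_width tile_height x_stride y_stride is_vaild (height.toNat + 1) 0

-- ===== PORT B =====
-- closed-form 1D tiling of Source B's _axis_tiles: m interior tiles by one ceiling division,
-- origins k*stride for k in range(m), plus at most one clamped edge tile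
def pvAxisTiles (length tile stride : Int) (is_vaild : Bool) : List (Int × Int) :=
  let stride := if stride = 0 then tile else stride
  let bound := min length (length - tile)
  let m : Int := if bound ≤ 0 then 0 else -(PySem.Int.floordiv (-bound) stride)
  let tiles := (List.range m.toNat).map (fun k : Nat => ((k : Int) * stride, tile))
  if m * stride < length then
    tiles ++ [if is_vaild then (m * stride, length - m * stride) else (length - tile, tile)]
  else tiles

def gen_extents_alt (width : Int) (height : Int) (tile_width : Int) (tile_height : Int) (x_stride : Int) (y_stride : Int) (is_vaild : Bool) : List (Int × Int × Int × Int) :=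
  if x_stride > tile_width then []          -- B raises here; excluded by Pre_
  else if tile_width > width then []        -- B raises here; excluded by Pre_
  else if tile_height > height then []      -- B raises here; excluded by Pre_
  else
    (pvAxisTiles height tile_height y_stride is_vaild).flatMap fun yp =>
      (pvAxisTiles width tile_width x_stride is_vaild).map fun xp => (xp.1, yp.1, xp.2, yp.2)

-- ===== PRECONDITION & SPEC =====
-- Pre_ excludes exactly the inputs where Python A does not return: the guard violations on
-- which A raises an Exception, and the non-positive effective strides (with a strictly
-- smaller tile on that axis, and rows/columns to visit) on which A loops forever.
def Pre_gen_extents (width : Int) (height : Int) (tile_width : Int) (tile_height : Int) (x_stride : Int) (y_stride : Int) (is_vaild : Bool) : Prop :=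
  x_stride ≤ tile_width ∧ tile_width ≤ width ∧ tile_height ≤ height ∧
  (height ≤ 0 ∨
    (((if y_stride = 0 then tile_height else y_stride) > 0 ∨ height ≤ tile_height) ∧
     (width ≤ 0 ∨ (if x_stride = 0 then tile_width else x_stride) > 0 ∨ width ≤ tile_width)))
instance (width : Int) (height : Int) (tile_width : Int) (tile_height : Int) (x_stride : Int) (y_stride : Int) (is_vaild : Bool) : Decidable (Pre_gen_extents width height tile_width tile_height x_stride y_stride is_vaild) := by unfold Pre_gen_extents; infer_instance

def pvWitness_gen_extents : Int × Int × Int × Int × Int × Int × Bool := (10, 10, 4, 4, 2, 2, false)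

def Spec_gen_extents (width : Int) (height : Int) (tile_width : Int) (tile_height : Int) (x_stride : Int) (y_stride : Int) (is_vaild : Bool) (out : List (Int × Int × Int × Int)) : Prop := out = gen_extents_alt width height tile_width tile_height x_stride y_stride is_vaild
instance (width : Int) (height : Int) (tile_width : Int) (tile_height : Int) (x_stride : Int) (y_stride : Int) (is_vaild : Bool) (out : List (Int × Int × Int × Int)) : Decidable (Spec_gen_extents width height tile_width tile_height x_stride y_stride is_vaild out) := by unfold Spec_gen_extents; infer_instance

-- ===== CLAIM (what is proved, stated in full; the proofs are below) =====
def Claim_equal_gen_extents : Prop := ∀ (width : Int) (height : Int) (tile_width : Int) (tile_height : Int) (x_stride : Int) (y_stride : Int) (is_vaild : Bool), Dom_gen_extents width height tile_width tile_height x_stride y_stride is_vaild → Pre_gen_extents width height tile_width tile_height x_stride y_stride is_vaild → Spec_gen_extents width height tile_width tile_height x_stride y_stride is_vaild (gen_extents width height tile_width tile_height x_stride y_stride is_vaild)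

-- ===== LEMMAS AND PROOFS =====

-- proof-only helper: the generic 1D stepping loop underlying both of A's while-loops
def pvAxisLoop (L t s : Int) (v : Bool) : Nat → Int → List (Int × Int)
  | 0, _ => []
  | fuel + 1, p =>
    if p < L then
      if p + t ≥ L then
        if v then [(p, L - p)] else [(L - t, t)]
      else
        (p, t) :: pvAxisLoop L t s v fuel (p + s)
    else []

-- the closed form of the loop started at cursor position p (s already the effective stride)
def pvClosedFrom (L t s : Int) (v : Bool) (p : Int) : List (Int × Int) :=
  let m : Int := if min L (L - t) - p ≤ 0 then 0 else -(PySem.Int.floordiv (-(min L (L - t) - p)) s)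
  let tiles := (List.range m.toNat).map (fun k : Nat => (p + (k : Int) * s, t))
  if p + m * s < L then
    tiles ++ [if v then (p + m * s, L - (p + m * s)) else (L - t, t)]
  else tiles

-- A's inner loop is the generic axis loop, decorated with the fixed row data.
theorem pvInnerA_eq (width tile_width x_stride : Int) (is_vaild : Bool) (y_begin y_vaild : Int) :
    ∀ (fuel : Nat) (x : Int),
      pvInnerA width tile_width x_stride is_vaild y_begin y_vaild fuel x
        = (pvAxisLoop width tile_width x_stride is_vaild fuel x).map
            (fun xp => (xp.1, y_begin, xp.2, y_vaild)) := by
  intro fuel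
  induction fuel with
  | zero => intro x; rfl
  | succ n ih =>
    intro x
    simp only [pvInnerA, pvAxisLoop]
    split_ifs <;> simp [ih]

-- A's outer loop is the flatMap of the y-axis loop against the (row-independent) x-axis loop.
theorem pvOuterA_eq (width height tile_width tile_height x_stride y_stride : Int) (is_vaild : Bool) :
    ∀ (fuel : Nat) (y : Int),
      pvOuterA width height tile_width tile_height x_stride y_stride is_vaild fuel y
        = (pvAxisLoop height tile_height y_stride is_vaild fuel y).flatMap
            (fun yp => (pvAxisLoop width tile_width x_stride is_vaild (width.toNat + 1) 0).map
              (fun xp => (xp.1, yp.1, xp.2, yp.2))) := by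
  intro fuel
  induction fuel with
  | zero => intro y; rfl
  | succ n ih =>
    intro y
    rw [show pvAxisLoop height tile_height y_stride is_vaild (n + 1) y
          = (if y < height then
               if y + tile_height ≥ height then
                 if is_vaild then [(y, height - y)] else [(height - tile_height, tile_height)]
               else (y, tile_height) :: pvAxisLoop height tile_height y_stride is_vaild n (y + y_stride)
             else []) from rfl]
    simp only [pvOuterA]
    split_ifs <;> simp [pvInnerA_eq, ih]

-- characterization of the ceiling division used for the interior tile count
theorem pvCeil_eq (a s q : Int) (hs : 0 < s) (h1 : (q - 1) * s < a) (h2 : a ≤ q * s) :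
    -(PySem.Int.floordiv (-a) s) = q :=
  (PySem.Int.neg_floordiv_neg_eq_iff_of_pos hs).mpr ⟨h1, h2⟩

-- the key lemma: with positive stride and enough fuel, the stepping loop equals the closed form
theorem pvAxisLoop_eq_closed (L t s : Int) (v : Bool) (hs : 0 < s) :
    ∀ (fuel : Nat) (p : Int), L - p ≤ fuel →
      pvAxisLoop L t s v fuel p = pvClosedFrom L t s v p := by
  intro fuel
  induction fuel with
  | zero =>
    intro p hf
    have hpL : ¬ p < L := by omega
    simp only [pvAxisLoop, pvClosedFrom, if_pos (show min L (L - t) - p ≤ 0 by omega)]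
    simp [hpL]
  | succ n ih =>
    intro p hf
    simp only [pvAxisLoop]
    by_cases hpL : p < L
    · by_cases hedge : p + t ≥ L
      · -- edge tile immediately: m = 0
        simp only [pvClosedFrom, if_pos (show min L (L - t) - p ≤ 0 by omega)]
        simp only [if_pos hpL, if_pos hedge]
        cases v <;> simp [hpL]
      · -- interior tile, recurse at p + s
        have hmne : ¬ min L (L - t) - p ≤ 0 := by omega
        set M := min L (L - t) with hM
        set m : Int := -(PySem.Int.floordiv (-(M - p)) s) with hmdef
        have hmb : (m - 1) * s < M - p ∧ M - p ≤ m * s :=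
          (PySem.Int.neg_floordiv_neg_eq_iff_of_pos hs).mp rfl
        have hm1 : 1 ≤ m := by nlinarith [hmb.1, hmb.2]
        have hrec : pvAxisLoop L t s v n (p + s) = pvClosedFrom L t s v (p + s) := by
          apply ih; omega
        rw [if_pos hpL, if_neg hedge, hrec]
        -- closed form at p + s has count m - 1
        have hm' : (if M - (p + s) ≤ 0 then (0 : Int)
            else -(PySem.Int.floordiv (-(M - (p + s))) s)) = m - 1 := by
          by_cases hz : M - (p + s) ≤ 0
          · rw [if_pos hz]
            have : m = 1 := by
              apply pvCeil_eq _ _ _ hs <;> nlinarith [hmb.1, hmb.2]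
            omega
          · rw [if_neg hz]
            apply pvCeil_eq _ _ _ hs <;> nlinarith [hmb.1, hmb.2]
        simp only [pvClosedFrom, if_neg hmne, ← hM, hm', ← hmdef]
        have hrange : m.toNat = (m - 1).toNat + 1 := by omega
        have hmap : (List.range (m - 1).toNat).map
              ((fun k : Nat => (p + (k : Int) * s, t)) ∘ Nat.succ)
            = (List.range (m - 1).toNat).map (fun k : Nat => ((p + s) + (k : Int) * s, t)) := by
          apply List.map_congr_left
          intro k _
          simp only [Function.comp, Prod.mk.injEq]
          push_cast
          constructor
          · ring
          · trivial
        have hedgeiff : p + m * s < L ↔ (p + s) + (m - 1) * s < L := by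
          constructor <;> (intro; nlinarith)
        have hedgeval : p + m * s = (p + s) + (m - 1) * s := by ring
        by_cases he : (p + s) + (m - 1) * s < L
        · rw [if_pos he, if_pos (hedgeiff.mpr he), hrange, List.range_succ_eq_map]
          simp only [List.map_cons, List.map_map, hmap, List.cons_append]
          rw [hedgeval]
          norm_num
        · rw [if_neg he, if_neg (fun h => he (hedgeiff.mp h)), hrange, List.range_succ_eq_map]
          simp only [List.map_cons, List.map_map, hmap]
          norm_num
    · -- cursor already past the end: both empty
      simp only [pvClosedFrom, if_pos (show min L (L - t) - p ≤ 0 by omega)]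
      simp [hpL]

-- B's per-axis list is the closed form at cursor 0, for the effective stride
theorem pvAxisTiles_eq_closed (L t s : Int) (v : Bool) :
    pvAxisTiles L t s v = pvClosedFrom L t (if s = 0 then t else s) v 0 := by
  simp only [pvAxisTiles, pvClosedFrom, sub_zero, zero_add]

-- with Pre_'s per-axis condition, the loop at cursor 0 equals B's per-axis list
theorem pvAxis_main (L t s : Int) (v : Bool)
    (h : L ≤ 0 ∨ 0 < (if s = 0 then t else s) ∨ L ≤ t) :
    pvAxisLoop L t (if s = 0 then t else s) v (L.toNat + 1) 0 = pvAxisTiles L t s v := by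
  rw [pvAxisTiles_eq_closed]
  set s' : Int := if s = 0 then t else s with hs'
  by_cases hpos : 0 < s'
  · exact pvAxisLoop_eq_closed L t s' v hpos (L.toNat + 1) 0 (by omega)
  · -- degenerate: L ≤ 0, or 0 < L ≤ t (edge tile immediately); the loop takes at most one step
    have hcase : L ≤ 0 ∨ L ≤ t := by tauto
    simp only [pvAxisLoop]
    by_cases hL : (0 : Int) < L
    · have ht : L ≤ t := by omega
      rw [if_pos hL, if_pos (by omega : (0 : Int) + t ≥ L)]
      simp only [pvClosedFrom, if_pos (show min L (L - t) - 0 ≤ 0 by omega)]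
      cases v <;> simp [hL]
    · rw [if_neg hL]
      simp only [pvClosedFrom, if_pos (show min L (L - t) - 0 ≤ 0 by omega)]
      simp [hL]

-- the y-axis list is empty when there are no rows at all
theorem pvAxisTiles_nil (L t s : Int) (v : Bool) (hL : L ≤ 0) :
    pvAxisTiles L t s v = [] := by
  rw [pvAxisTiles_eq_closed]
  simp only [pvClosedFrom, if_pos (show min L (L - t) - 0 ≤ 0 by omega)]
  simp [hL]

-- ===== VERDICT (by name: the statement is the Claim_ definition above) =====
theorem gen_extents_spec : Claim_equal_gen_extents := by
  intro width height tile_width tile_height x_stride y_stride is_vaild _ hpre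
  obtain ⟨h1, h2, h3, h4⟩ := hpre
  have hg1 : ¬ (x_stride > tile_width) := by omega
  have hg2 : ¬ (tile_width > width) := by omega
  have hg3 : ¬ (tile_height > height) := by omega
  unfold Spec_gen_extents gen_extents gen_extents_alt
  simp only [hg1, hg2, hg3, if_false]
  rw [pvOuterA_eq]
  by_cases hh : height ≤ 0
  · -- no rows at all: both sides are a flatMap over the empty y-list
    rw [pvAxis_main height tile_height y_stride is_vaild (Or.inl hh),
        pvAxisTiles_nil height tile_height y_stride is_vaild hh]
    simp
  · rcases h4 with h4 | ⟨hy4, hx4⟩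
    · omega
    · rw [pvAxis_main height tile_height y_stride is_vaild (Or.inr hy4),
          pvAxis_main width tile_width x_stride is_vaild hx4]
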